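-- pv_equiv track=rewrite | github.com/ReidCaspary/Dart | src/stac5_manager.py | _decode_alarm
-- ===== SOURCE A (Python) =====
-- def _decode_alarm(alarm_code: str) -> str:
--     """Decode alarm code to human-readable message."""
--     # STAC5 alarm codes (from Applied Motion documentation)
--     alarm_messages = {
--         "0000": "No Alarm",
--         "0001": "Position Limit",
--         "0002": "CCW Limit",
--         "0004": "CW Limit",
--         "0008": "Over Temp",
--         "0010": "Internal Voltage",
--         "0020": "Over Voltage",
--         "0040": "Under Voltage",
--         "0080": "Over Current",
--         "0100": "Open Motor Winding",
--         "0200": "Bad Encoder",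
--         "0400": "Comm Error",
--         "0800": "Bad Flash",
--         "1000": "No Move",
--         "2000": "Blank Q Segment",
--         "4000": "No Motor Connected",
--         "8000": "Motor Disabled",
--     }
--     # Try exact match first
--     if alarm_code in alarm_messages:
--         return alarm_messages[alarm_code]
--     # Try to decode as hex bitmask
--     try:
--         code = int(alarm_code, 16)
--         if code == 0:
--             return "No Alarm"
--         # Check each bit
--         alarms = []
--         for hex_code, msg in alarm_messages.items():
--             bit = int(hex_code, 16)
--             if bit and (code & bit):
--                 alarms.append(msg)
--         return ", ".join(alarms) if alarms else f"Unknown ({alarm_code})"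
--     except:
--         return f"Unknown ({alarm_code})"
-- ===== SOURCE B (Python) =====
-- # Recursive decoder: walk the binary expansion of the parsed code with divmod,
-- # consuming the message list structurally -- no alarm-code table, no bitmask tests,
-- # no exact-match branch; objective: simpler.
-- MESSAGES = [
--     "Position Limit", "CCW Limit", "CW Limit", "Over Temp",
--     "Internal Voltage", "Over Voltage", "Under Voltage", "Over Current",
--     "Open Motor Winding", "Bad Encoder", "Comm Error", "Bad Flash",
--     "No Move", "Blank Q Segment", "No Motor Connected", "Motor Disabled",
-- ]
--
-- def _names(code: int, msgs: list) -> list: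
--     """Messages of the set bits of code, low bit first, one per list element."""
--     if code == 0 or not msgs:
--         return []
--     q, r = divmod(code, 2)
--     rest = _names(q, msgs[1:])
--     return [msgs[0]] + rest if r else rest
--
-- def _decode_alarm(alarm_code: str) -> str:
--     """Decode alarm code to human-readable message."""
--     try:
--         code = int(alarm_code, 16)
--     except ValueError:
--         return f"Unknown ({alarm_code})"
--     if code == 0:
--         return "No Alarm"
--     alarms = _names(code, MESSAGES)
--     return ", ".join(alarms) if alarms else f"Unknown ({alarm_code})"
-- ===== Notes on version B (the rewrite author's own statement) =====
-- stated objective: simpler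
-- what changed: Replaces the hex-keyed dict scan (17 entries, each key re-parsed with int(key,16) and tested with a bitmask) and its redundant exact-match branch by a recursion on the binary expansion of the parsed code: divmod(code,2) peels one bit per step while consuming the message list structurally, stopping early when the code is exhausted; no code table and no bitwise operations at all.
import Mathlib
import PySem

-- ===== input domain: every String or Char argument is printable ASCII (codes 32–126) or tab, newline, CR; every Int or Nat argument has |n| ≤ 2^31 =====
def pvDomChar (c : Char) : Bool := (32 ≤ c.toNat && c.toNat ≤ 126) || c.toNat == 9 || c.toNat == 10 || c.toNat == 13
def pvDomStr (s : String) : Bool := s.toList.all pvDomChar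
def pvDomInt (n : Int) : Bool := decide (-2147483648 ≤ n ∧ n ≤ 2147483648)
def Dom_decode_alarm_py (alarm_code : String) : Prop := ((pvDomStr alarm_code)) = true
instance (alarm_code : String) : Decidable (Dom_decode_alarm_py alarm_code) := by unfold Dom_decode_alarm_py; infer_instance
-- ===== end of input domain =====

-- B replaces A's hex-keyed dict scan (plus redundant exact-match branch) by a recursion
-- on the binary expansion of the parsed code via divmod, consuming the message list
-- structurally; objective: simpler.

-- ===== PORT A =====
-- the dict literal alarm_messages, in insertion order
def alarmItems : List (String × String) :=
  [("0000", "No Alarm"), ("0001", "Position Limit"), ("0002", "CCW Limit"),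
   ("0004", "CW Limit"), ("0008", "Over Temp"), ("0010", "Internal Voltage"),
   ("0020", "Over Voltage"), ("0040", "Under Voltage"), ("0080", "Over Current"),
   ("0100", "Open Motor Winding"), ("0200", "Bad Encoder"), ("0400", "Comm Error"),
   ("0800", "Bad Flash"), ("1000", "No Move"), ("2000", "Blank Q Segment"),
   ("4000", "No Motor Connected"), ("8000", "Motor Disabled")]

def alarmDict : PySem.Dict String String := PySem.Dict.ofList alarmItems

def decode_alarm_py (alarm_code : String) : String :=
  -- "if alarm_code in alarm_messages: return alarm_messages[alarm_code]"
  -- (the lookup cannot raise under the branch, so the total getD form is exact)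
  if alarmDict.contains alarm_code then alarmDict.getD alarm_code ""
  else
    match PySem.Int.ofStrBase? alarm_code 16 with
    | none => "Unknown (" ++ alarm_code ++ ")"   -- int raised ValueError, bare except
    | some code =>
      if code = 0 then "No Alarm"
      else
        -- for hex_code, msg in alarm_messages.items(): bit = int(hex_code, 16); if bit and (code & bit): alarms.append(msg)
        -- (int(hex_code, 16) never raises on the literal keys, so .getD 0 is exact)
        let alarms := alarmDict.items.foldl (fun acc p =>
          if ((PySem.Int.ofStrBase? p.1 16).getD 0 != 0)
              && (PySem.Int.band code ((PySem.Int.ofStrBase? p.1 16).getD 0) != 0)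
          then acc ++ [p.2] else acc) []
        if alarms ≠ [] then PySem.Str.join ", " alarms else "Unknown (" ++ alarm_code ++ ")"

-- ===== PORT B =====
def MESSAGES : List String :=
  ["Position Limit", "CCW Limit", "CW Limit", "Over Temp",
   "Internal Voltage", "Over Voltage", "Under Voltage", "Over Current",
   "Open Motor Winding", "Bad Encoder", "Comm Error", "Bad Flash",
   "No Move", "Blank Q Segment", "No Motor Connected", "Motor Disabled"]

-- _names(code, msgs): recursion on the binary expansion of code, consuming msgs
def namesB (code : Int) : List String → List String
  | [] => []                                   -- "or not msgs"
  | m :: rest =>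
    if code = 0 then []                        -- "if code == 0"
    else
      -- q, r = divmod(code, 2): divisor 2 ≠ 0, so the total floordiv/mod are exact
      let q := PySem.Int.floordiv code 2
      let r := PySem.Int.mod code 2
      let restL := namesB q rest               -- _names(q, msgs[1:])
      if r ≠ 0 then m :: restL else restL      -- "[msgs[0]] + rest if r else rest"

def decode_alarm_py_alt (alarm_code : String) : String :=
  match PySem.Int.ofStrBase? alarm_code 16 with
  | none => "Unknown (" ++ alarm_code ++ ")"   -- except ValueError
  | some code =>
    if code = 0 then "No Alarm"
    else
      let alarms := namesB code MESSAGES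
      if alarms ≠ [] then PySem.Str.join ", " alarms else "Unknown (" ++ alarm_code ++ ")"

-- ===== PRECONDITION & SPEC =====
def Spec_decode_alarm_py (alarm_code : String) (out : String) : Prop := out = decode_alarm_py_alt alarm_code
instance (alarm_code : String) (out : String) : Decidable (Spec_decode_alarm_py alarm_code out) := by unfold Spec_decode_alarm_py; infer_instance

-- ===== CLAIM (what is proved, stated in full; the proofs are below) =====
def Claim_equal_decode_alarm_py : Prop := ∀ (alarm_code : String), Dom_decode_alarm_py alarm_code → Spec_decode_alarm_py alarm_code (decode_alarm_py alarm_code)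

-- ===== LEMMAS AND PROOFS =====

-- proof helper: the list of (bit value, message) pairs, bits doubling from `bit`
def mkL (bit : Int) : List String → List (Int × String)
  | [] => []
  | m :: rest => (bit, m) :: mkL (2*bit) rest

-- Nat core of the bit-shift identity
theorem nat_and_two_mul (n b : Nat) : n &&& (2*b) = 2*((n/2) &&& b) := by
  apply Nat.eq_of_testBit_eq
  intro i
  cases i with
  | zero =>
    have h1 : (2*b) % 2 = 0 := by omega
    have h2 : (2*((n/2) &&& b)) % 2 = 0 := by omega
    simp [Nat.testBit_zero, h1, h2]
  | succ i =>
    have hs : ∀ x : Nat, x.testBit (i+1) = (x/2).testBit i := fun x => Nat.testBit_succ x i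
    have h1 : (2*b)/2 = b := by omega
    have h2 : (2*((n/2) &&& b))/2 = ((n/2) &&& b) := by omega
    rw [Nat.testBit_and, hs, hs, hs, h1, h2, Nat.testBit_and]

theorem fdiv_two_nonneg (a : Int) (h : 0 ≤ a) :
    PySem.Int.floordiv a 2 = ((a.toNat/2 : Nat) : Int) := by
  have h2 := PySem.Int.floordiv_natCast a.toNat 2
  have ha : ((a.toNat : Int)) = a := Int.toNat_of_nonneg h
  rw [← ha]
  exact_mod_cast h2

theorem fdiv_two_neg (m : Nat) :
    PySem.Int.floordiv (-((m:Int)+1)) 2 = -(((m/2 : Nat) : Int)+1) := by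
  rw [PySem.Int.floordiv_eq_iff_of_pos (by norm_num)]
  constructor <;> push_cast <;> omega

-- a & (2b) = 2 * ((a floordiv 2) & b), Python semantics, any a, 0 ≤ b
theorem band_double (a b : Int) (hb : 0 ≤ b) :
    PySem.Int.band a (2*b) = 2 * PySem.Int.band (PySem.Int.floordiv a 2) b := by
  by_cases ha : 0 ≤ a
  · have hq : PySem.Int.floordiv a 2 = ((a.toNat/2 : Nat) : Int) := fdiv_two_nonneg a ha
    rw [hq]
    rw [PySem.Int.band_of_nonneg ha (by omega), PySem.Int.band_of_nonneg (by positivity) hb]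
    have h2b : (2*b).toNat = 2*b.toNat := by omega
    have hc : ((a.toNat/2 : Nat) : Int).toNat = a.toNat/2 := by omega
    rw [h2b, hc, nat_and_two_mul]
    push_cast; ring
  · set m : Nat := (-a-1).toNat with hm
    have ham : a = -((m:Int)+1) := by omega
    have hq : PySem.Int.floordiv a 2 = -(((m/2 : Nat) : Int)+1) := by rw [ham]; exact fdiv_two_neg m
    have hqneg : ¬ (0 ≤ PySem.Int.floordiv a 2) := by rw [hq]; omega
    rw [hq] at hqneg ⊢
    simp only [PySem.Int.band]
    rw [if_neg ha, if_pos (by omega : (0:Int) ≤ 2*b), if_neg hqneg, if_pos hb]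
    have h2b : (2*b).toNat = 2*b.toNat := by omega
    have hma : (-a-1).toNat = m := by omega
    have hmq : (-(-(((m/2 : Nat) : Int)+1))-1).toNat = m/2 := by omega
    rw [h2b, hma, hmq]
    have hand : 2*b.toNat &&& m = 2*(b.toNat &&& (m/2)) := by
      rw [Nat.and_comm, nat_and_two_mul, Nat.and_comm]
    rw [hand]
    have hle : b.toNat &&& (m/2) ≤ b.toNat := Nat.and_le_left
    omega

theorem namesB_zero : ∀ msgs : List String, namesB 0 msgs = [] := by
  intro msgs; cases msgs <;> simp [namesB]

-- shifting the bit column down one step equals floordividing the code by 2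
theorem filter_shift : ∀ (msgs : List String) (code bit : Int), 0 ≤ bit →
    ((mkL (2*bit) msgs).filter (fun p => PySem.Int.band code p.1 != 0)).map (·.2)
    = ((mkL bit msgs).filter (fun p => PySem.Int.band (PySem.Int.floordiv code 2) p.1 != 0)).map (·.2) := by
  intro msgs
  induction msgs with
  | nil => intro code bit _; rfl
  | cons m rest ih =>
    intro code bit hb
    simp only [mkL, List.filter_cons]
    have htest : (PySem.Int.band code (2*bit) != 0)
        = (PySem.Int.band (PySem.Int.floordiv code 2) bit != 0) := by
      rw [band_double code bit hb, Bool.eq_iff_iff]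
      simp
    have htail := ih code (2*bit) (by omega)
    rw [htest]
    by_cases h : (PySem.Int.band (PySem.Int.floordiv code 2) bit != 0) = true
    · rw [if_pos h, if_pos h, List.map_cons, List.map_cons, htail]
    · rw [if_neg h, if_neg h]; exact htail

-- unfolding of namesB on a cons cell with nonzero code
theorem namesB_cons (code : Int) (h0 : code ≠ 0) (m : String) (rest : List String) :
    namesB code (m :: rest)
    = if PySem.Int.mod code 2 ≠ 0 then m :: namesB (PySem.Int.floordiv code 2) rest
      else namesB (PySem.Int.floordiv code 2) rest := by
  simp [namesB, h0]

-- the A-side filtered table equals B's divmod recursion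
theorem mkL_filter_eq_namesB : ∀ (msgs : List String) (code : Int),
    ((mkL 1 msgs).filter (fun p => PySem.Int.band code p.1 != 0)).map (·.2)
    = namesB code msgs := by
  intro msgs
  induction msgs with
  | nil => intro code; rfl
  | cons m rest ih =>
    intro code
    simp only [mkL, List.filter_cons]
    rw [apply_ite (List.map (fun x : Int × String => x.2))]
    have htail : ((mkL (2*1) rest).filter (fun p => PySem.Int.band code p.1 != 0)).map (·.2)
        = namesB (PySem.Int.floordiv code 2) rest := by
      rw [filter_shift rest code 1 (by norm_num)]
      exact ih (PySem.Int.floordiv code 2)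
    by_cases h0 : code = 0
    · subst h0
      have hbz : (PySem.Int.band 0 1 != 0) = false := by decide
      have hf : PySem.Int.floordiv 0 2 = 0 := by decide
      rw [hbz]
      simp only [Bool.false_eq_true, if_false]
      rw [htail, hf, namesB_zero, namesB_zero]
    · rw [namesB_cons code h0 m rest]
      have hb1 : (PySem.Int.band code 1 != 0) = (PySem.Int.mod code 2 != 0) := by
        rw [PySem.Int.band_one]
      rw [hb1, List.map_cons, htail]
      by_cases hm : PySem.Int.mod code 2 = 0
      · have ht : (PySem.Int.mod code 2 != 0) = false := by rw [hm]; rfl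
        rw [ht]
        simp only [Bool.false_eq_true, if_false]
        rw [if_neg (not_not_intro hm)]
      · have ht : (PySem.Int.mod code 2 != 0) = true := by simpa using hm
        rw [ht, if_pos rfl, if_pos hm]

-- two filters over element-wise matching lists (same test value, same payload) agree
theorem filter_map_snd_congr {α β γ : Type} :
    ∀ (l1 : List (α × γ)) (l2 : List (β × γ)) (p : α × γ → Bool) (q : β × γ → Bool),
      l1.map (fun x => (p x, x.2)) = l2.map (fun x => (q x, x.2)) →
      (l1.filter p).map (·.2) = (l2.filter q).map (·.2) := by
  intro l1
  induction l1 with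
  | nil => intro l2 p q h; cases l2 <;> simp_all
  | cons x t ih =>
    intro l2 p q h
    cases l2 with
    | nil => simp at h
    | cons y t2 =>
      simp only [List.map_cons, List.cons.injEq, Prod.mk.injEq] at h
      obtain ⟨⟨hpq, hsnd⟩, htail⟩ := h
      cases hq : q y <;>
        simp [hpq, hq, hsnd, ih t2 p q htail]

-- the two alarm lists agree for every code
theorem alarms_eq (code : Int) :
    alarmDict.items.foldl (fun acc p =>
        if ((PySem.Int.ofStrBase? p.1 16).getD 0 != 0)
            && (PySem.Int.band code ((PySem.Int.ofStrBase? p.1 16).getD 0) != 0)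
        then acc ++ [p.2] else acc) [] =
    namesB code MESSAGES := by
  rw [PySem.List.foldl_append_if]
  simp only [List.nil_append]
  -- the "0000" entry never passes the test (its bit is 0), so drop it by reduction
  show (alarmItems.tail.filter (fun p =>
      ((PySem.Int.ofStrBase? p.1 16).getD 0 != 0)
        && (PySem.Int.band code ((PySem.Int.ofStrBase? p.1 16).getD 0) != 0))).map (·.2) = _
  rw [filter_map_snd_congr alarmItems.tail (mkL 1 MESSAGES) _
      (fun p => PySem.Int.band code p.1 != 0) rfl]
  exact mkL_filter_eq_namesB MESSAGES code

theorem decode_alarm_eq (s : String) : decode_alarm_py s = decode_alarm_py_alt s := by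
  unfold decode_alarm_py
  by_cases hc : alarmDict.contains s = true
  · -- s is one of the 17 literal keys: check each by evaluation
    have hk : s ∈ alarmDict.keys := by
      have := PySem.Dict.contains_eq_decide_mem_keys (d := alarmDict) (k := s)
      rw [this] at hc; exact of_decide_eq_true hc
    have : s = "0000" ∨ s = "0001" ∨ s = "0002" ∨ s = "0004" ∨ s = "0008" ∨
        s = "0010" ∨ s = "0020" ∨ s = "0040" ∨ s = "0080" ∨ s = "0100" ∨
        s = "0200" ∨ s = "0400" ∨ s = "0800" ∨ s = "1000" ∨ s = "2000" ∨
        s = "4000" ∨ s = "8000" := by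
      revert hk
      have : alarmDict.keys = alarmItems.map (·.1) := by decide
      rw [this]
      intro hk; simpa [alarmItems] using hk
    rcases this with rfl|rfl|rfl|rfl|rfl|rfl|rfl|rfl|rfl|rfl|rfl|rfl|rfl|rfl|rfl|rfl|rfl <;>
      decide
  · simp only [hc, if_neg, Bool.false_eq_true, not_false_iff]
    unfold decode_alarm_py_alt
    cases hp : PySem.Int.ofStrBase? s 16 with
    | none => rfl
    | some code =>
      by_cases h0 : code = 0
      · simp [h0]
      · simp only [h0, if_false, alarms_eq]

-- ===== VERDICT (by name: the statement is the Claim_ definition above) =====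
theorem decode_alarm_py_spec : Claim_equal_decode_alarm_py := by
  intro s _
  unfold Spec_decode_alarm_py
  exact decode_alarm_eq s
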